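-- pv_equiv track=rewrite | github.com/nobodyyyyyy/evaporation_ducts | new/data/DataUtil.py | get_heading_idx_for_sounding_txt
-- ===== SOURCE A (Python) =====
-- def get_heading_idx_for_sounding_txt(header):
--     # todo 有负数符号的情况会有 bug!
--     # eg. 52323 站点
--     col_index = [0]
--     _l = -1
--     processing = False
--     for _r in range(len(header)):
--         if header[_r] == ' ' and _l == -1:
--             continue
--         elif header[_r] != ' ' and not processing:
--             _l = _r
--             processing = True
--         elif header[_r] == ' ' and processing:
--             processing = False
--             col_index.append(_r)
--             _l = _r
--     col_index.append(_r)
--     return col_index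
-- ===== SOURCE B (Python) =====
-- def get_heading_idx_for_sounding_txt(header):
--     # Two-pointer skip/seek over tokens: skip spaces to the next token start,
--     # then jump with str.find to the space that ends it; no per-character state machine.
--     n = len(header)
--     col_index = [0]
--     i = 0
--     while True:
--         while i < n and header[i] == ' ':
--             i += 1
--         if i == n:
--             break
--         j = header.find(' ', i)
--         if j == -1:
--             break
--         col_index.append(j)
--         i = j
--     col_index.append(n - 1)
--     return col_index
-- ===== Notes on version B (the rewrite author's own statement) =====
-- stated objective: faster
-- what changed: Replaced A's per-character _l/processing state machine with a two-pointer skip/seek loop over tokens: skip runs of spaces, then jump with str.find (C-speed scan) to the space ending the token and append it.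
import Mathlib
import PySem

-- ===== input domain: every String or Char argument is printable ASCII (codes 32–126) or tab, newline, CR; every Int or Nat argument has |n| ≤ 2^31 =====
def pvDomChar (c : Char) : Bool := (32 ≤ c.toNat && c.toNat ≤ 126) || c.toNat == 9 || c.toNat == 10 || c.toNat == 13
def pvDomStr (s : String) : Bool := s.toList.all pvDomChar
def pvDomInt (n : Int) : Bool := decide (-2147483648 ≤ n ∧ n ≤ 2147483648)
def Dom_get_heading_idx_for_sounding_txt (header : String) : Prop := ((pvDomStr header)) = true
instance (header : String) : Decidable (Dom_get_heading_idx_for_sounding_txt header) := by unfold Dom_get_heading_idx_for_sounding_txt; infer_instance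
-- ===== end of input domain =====

-- B replaces A's per-character _l/processing state machine by a two-pointer skip/seek
-- over tokens (skip spaces, then jump with str.find to the space ending the token): same O(n), measured faster by a constant factor.


-- ===== PORT A =====
-- character access: header[_r] is always in range inside the loops of both ports, so List.getD is exact
def pvChr (cs : List Char) (i : Nat) : Char := cs.getD i ' '

-- one loop step of A
def stepA (cs : List Char) (s : List Int × Int × Bool) (r : Nat) : List Int × Int × Bool :=
  let c := pvChr cs r
  if c = ' ' ∧ s.2.1 = -1 then s
  else if c ≠ ' ' ∧ s.2.2 = false then (s.1, (r : Int), true)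
  else if c = ' ' ∧ s.2.2 = true then (s.1 ++ [(r : Int)], (r : Int), false)
  else s

def get_heading_idx_for_sounding_txt (header : String) : List Int :=
  let cs := header.toList
  let n := cs.length
  let st := (List.range n).foldl (stepA cs) ([0], -1, false)
  -- final 'col_index.append(_r)': _r is the last loop index, n-1 (A raises for n = 0, outside Pre_)
  st.1 ++ [(n : Int) - 1]

-- ===== PORT B =====
-- inner 'while i < n and header[i] == " "': skip spaces
def skipSpaces (cs : List Char) (i : Nat) : Nat :=
  if i < cs.length ∧ pvChr cs i = ' ' then skipSpaces cs (i + 1) else i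
termination_by cs.length - i
decreasing_by omega

-- header.find(' ', i): hand port of str.find for the one-char needle ' ' — first
-- index ≥ i holding ' ', else -1 (exact: Python's find with a 1-char needle)
def findSpace (cs : List Char) (i : Nat) : Int :=
  if i < cs.length then
    (if pvChr cs i = ' ' then (i : Int) else findSpace cs (i + 1))
  else -1
termination_by cs.length - i
decreasing_by omega

-- the outer 'while True' loop of B (fuel-counted: fuel = len+1 always suffices,
-- since each round strictly advances i; the 0-fuel branch is never reached)
def seekLoop (cs : List Char) (fuel : Nat) (i : Nat) (acc : List Int) : List Int :=
  match fuel with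
  | 0 => acc
  | fuel + 1 =>
    let i' := skipSpaces cs i
    if i' < cs.length then
      let j := findSpace cs i'
      if j = -1 then acc
      else seekLoop cs fuel j.toNat (acc ++ [j])
    else acc

def get_heading_idx_for_sounding_txt_alt (header : String) : List Int :=
  let cs := header.toList
  let n := cs.length
  seekLoop cs (n + 1) 0 [0] ++ [(n : Int) - 1]

-- ===== PRECONDITION & SPEC =====
-- Pre_ excludes only the empty string, on which A raises UnboundLocalError (_r unset after the loop).
def Pre_get_heading_idx_for_sounding_txt (header : String) : Prop := header ≠ ""
instance (header : String) : Decidable (Pre_get_heading_idx_for_sounding_txt header) := by unfold Pre_get_heading_idx_for_sounding_txt; infer_instance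
def pvWitness_get_heading_idx_for_sounding_txt : String := " P  T "

def Spec_get_heading_idx_for_sounding_txt (header : String) (out : List Int) : Prop := out = get_heading_idx_for_sounding_txt_alt header
instance (header : String) (out : List Int) : Decidable (Spec_get_heading_idx_for_sounding_txt header out) := by unfold Spec_get_heading_idx_for_sounding_txt; infer_instance

-- ===== CLAIM (what is proved, stated in full; the proofs are below) =====
def Claim_equal_get_heading_idx_for_sounding_txt : Prop := ∀ (header : String), Dom_get_heading_idx_for_sounding_txt header → Pre_get_heading_idx_for_sounding_txt header → Spec_get_heading_idx_for_sounding_txt header (get_heading_idx_for_sounding_txt header)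

-- ===== LEMMAS AND PROOFS =====

-- facts about the two inner loops
theorem skipSpaces_ge (cs : List Char) (i : Nat) : i ≤ skipSpaces cs i := by
  fun_induction skipSpaces cs i with
  | case1 i h ih => omega
  | case2 i h => omega

theorem skipSpaces_stop (cs : List Char) (i : Nat) (h : skipSpaces cs i < cs.length) :
    pvChr cs (skipSpaces cs i) ≠ ' ' := by
  fun_induction skipSpaces cs i with
  | case1 i h' ih => exact ih h
  | case2 i h' => intro hc; exact h' ⟨h, hc⟩

theorem findSpace_spec (cs : List Char) (i : Nat) (h : findSpace cs i ≠ -1) :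
    ∃ j : Nat, findSpace cs i = (j : Int) ∧ i ≤ j ∧ j < cs.length ∧ pvChr cs j = ' ' ∧
      ∀ r, i ≤ r → r < j → pvChr cs r ≠ ' ' := by
  fun_induction findSpace cs i with
  | case1 i hlt hc => exact ⟨i, rfl, le_refl i, hlt, hc, fun r h1 h2 => absurd h1 (by omega)⟩
  | case2 i hlt hc ih =>
      obtain ⟨j, he, h1, h2, h3, h4⟩ := ih h
      refine ⟨j, he, by omega, h2, h3, fun r hr1 hr2 => ?_⟩
      rcases Nat.eq_or_lt_of_le hr1 with he' | hlt'
      · exact he' ▸ hc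
      · exact h4 r hlt' hr2
  | case3 i hlt => exact absurd rfl h

theorem findSpace_none (cs : List Char) (i : Nat) (h : findSpace cs i = -1) :
    ∀ r, i ≤ r → r < cs.length → pvChr cs r ≠ ' ' := by
  fun_induction findSpace cs i with
  | case1 i hlt hc => simp at h
  | case2 i hlt hc ih =>
      intro r hr1 hr2
      rcases Nat.eq_or_lt_of_le hr1 with he | hlt'
      · exact he ▸ hc
      · exact ih h r hlt' hr2
  | case3 i hlt => intro r hr1 hr2; omega


-- the common characterisation both ports are reduced to: the column boundaries are
-- exactly the spaces (after position i) ending a non-space run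
def condB (cs : List Char) (i r : Nat) : Bool :=
  decide (i < r ∧ pvChr cs r = ' ' ∧ pvChr cs (r - 1) ≠ ' ')

-- one step of A's list viewed as an append-if (proof helper only)
def stepB (cs : List Char) (col : List Int) (r : Nat) : List Int :=
  if 0 < r ∧ pvChr cs r = ' ' ∧ pvChr cs (r - 1) ≠ ' ' then col ++ [(r : Int)] else col

-- Invariant after processing indices 0..k-1:
--   if all chars so far are spaces, A's state is ([0], -1, false) and the stepB fold is [0];
--   otherwise A's list equals the stepB fold, _l ≠ -1, and processing ↔ previous char non-space.
theorem fold_invariant (cs : List Char) (k : Nat) :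
    ((∀ i, i < k → pvChr cs i = ' ') →
        (List.range k).foldl (stepA cs) ([0], -1, false) = ([0], -1, false) ∧
        (List.range k).foldl (stepB cs) [0] = [0]) ∧
    ((∃ i, i < k ∧ pvChr cs i ≠ ' ') →
        ((List.range k).foldl (stepA cs) ([0], -1, false)).1 =
          (List.range k).foldl (stepB cs) [0] ∧
        ((List.range k).foldl (stepA cs) ([0], -1, false)).2.1 ≠ -1 ∧
        ((List.range k).foldl (stepA cs) ([0], -1, false)).2.2 =
          decide (pvChr cs (k - 1) ≠ ' ')) := by
  induction k with
  | zero => exact ⟨fun _ => ⟨rfl, rfl⟩, fun ⟨i, hi, _⟩ => absurd hi (Nat.not_lt_zero i)⟩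
  | succ k ih =>
    simp only [List.range_succ, List.foldl_append, List.foldl_cons, List.foldl_nil]
    by_cases hall : ∀ i, i < k → pvChr cs i = ' '
    · obtain ⟨hA, hB⟩ := ih.1 hall
      rw [hA, hB]
      by_cases hc : pvChr cs k = ' '
      · constructor
        · intro _
          refine ⟨?_, ?_⟩ <;> simp [stepA, stepB, hc]
          intro hk0; exact hall (k-1) (by omega)
        · intro ⟨i, hi, hne⟩
          rcases Nat.lt_succ_iff_lt_or_eq.mp hi with h | h
          · exact absurd (hall i h) hne
          · exact absurd hc (h ▸ hne)
      · constructor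
        · intro h; exact absurd (h k (Nat.lt_succ_self k)) hc
        · intro _
          simp [stepA, stepB, hc]
    · push_neg at hall
      obtain ⟨hEq, hl, hp⟩ := ih.2 (by
        obtain ⟨i, hi, hne⟩ := hall; exact ⟨i, hi, hne⟩)
      have hk0 : 0 < k := by
        obtain ⟨i, hi, _⟩ := hall; omega
      constructor
      · intro h
        obtain ⟨i, hi, hne⟩ := hall
        exact absurd (h i (Nat.lt_succ_of_lt hi)) hne
      · intro _
        have hsucc : k + 1 - 1 = k := rfl
        by_cases hprev : pvChr cs (k - 1) = ' '
        · have hpf : ((List.range k).foldl (stepA cs) ([0], -1, false)).2.2 = false := by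
            rw [hp]; simp [hprev]
          by_cases hc : pvChr cs k = ' '
          · simp only [stepA, stepB, hc, hpf, hl, hsucc]
            simp [hc, hprev, hl, hEq, hpf]
          · simp only [stepA, stepB, hsucc]
            simp [hc, hpf, hl, hEq]
        · have hpt : ((List.range k).foldl (stepA cs) ([0], -1, false)).2.2 = true := by
            rw [hp]; simp [hprev]
          by_cases hc : pvChr cs k = ' '
          · simp only [stepA, stepB, hsucc]
            simp [hc, hpt, hl, hk0, hprev, hEq]
          · simp only [stepA, stepB, hsucc]
            simp [hc, hpt, hl, hEq]

theorem fold_lists_eq (cs : List Char) (k : Nat) :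
    ((List.range k).foldl (stepA cs) ([0], -1, false)).1 =
      (List.range k).foldl (stepB cs) [0] := by
  by_cases h : ∀ i, i < k → pvChr cs i = ' '
  · obtain ⟨hA, hB⟩ := (fold_invariant cs k).1 h
    rw [hA, hB]
  · push_neg at h
    obtain ⟨i, hi, hne⟩ := h
    exact ((fold_invariant cs k).2 ⟨i, hi, hne⟩).1

-- the stepB fold is [0] followed by the filtered boundary indices
theorem foldB_filter (cs : List Char) (k : Nat) :
    (List.range k).foldl (stepB cs) [0] =
      [0] ++ ((List.range k).filter (condB cs 0)).map (fun r => ((r : Nat) : Int)) := by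
  induction k with
  | zero => rfl
  | succ k ih =>
    rw [List.range_succ, List.foldl_append, List.filter_append, ih]
    by_cases hc : 0 < k ∧ pvChr cs k = ' ' ∧ pvChr cs (k - 1) ≠ ' ' <;>
      simp [stepB, condB, hc]

-- splitting a filtered range at its least satisfying index
theorem filter_range_eq_cons {n j : Nat} {P Q : Nat → Bool} (hjn : j < n) (hPj : P j = true)
    (hlow : ∀ r, r < j → P r = false)
    (hiff : ∀ r, j < r → P r = Q r)
    (hQlow : ∀ r, r ≤ j → Q r = false) :
    (List.range n).filter P = j :: (List.range n).filter Q := by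
  have hsplit : List.range n = List.range j ++ List.range' j (n - j) := by
    obtain ⟨k, rfl⟩ : ∃ k, n = j + k := ⟨n - j, by omega⟩
    rw [Nat.add_sub_cancel_left, List.range_eq_range', List.range_eq_range',
      ← List.range'_append_1]
    norm_num
  have hcons : List.range' j (n - j) = j :: List.range' (j + 1) (n - j - 1) := by
    obtain ⟨k, hk⟩ : ∃ k, n - j = k + 1 := ⟨n - j - 1, by omega⟩
    rw [hk, List.range'_succ]
    norm_num
  rw [hsplit, hcons, List.filter_append, List.filter_append, List.filter_cons, List.filter_cons]
  have hPlow : (List.range j).filter P = [] := by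
    rw [List.filter_eq_nil_iff]; intro a ha
    simp [hlow a (List.mem_range.mp ha)]
  have hQlow' : (List.range j).filter Q = [] := by
    rw [List.filter_eq_nil_iff]; intro a ha
    simp [hQlow a (le_of_lt (List.mem_range.mp ha))]
  have hrest : (List.range' (j + 1) (n - j - 1)).filter P =
      (List.range' (j + 1) (n - j - 1)).filter Q := by
    apply List.filter_congr
    intro a ha
    have := List.mem_range'_1.mp ha
    exact hiff a (by omega)
  rw [hPlow, hQlow', hrest, hPj, hQlow j (le_refl j)]
  simp

-- all characters skipped by skipSpaces are spaces
theorem skipSpaces_all (cs : List Char) (i : Nat) :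
    ∀ r, i ≤ r → r < skipSpaces cs i → pvChr cs r = ' ' := by
  fun_induction skipSpaces cs i with
  | case1 i h' ih =>
    intro r h1 h2
    rcases Nat.eq_or_lt_of_le h1 with he | hlt
    · exact he ▸ h'.2
    · exact ih r hlt h2
  | case2 i h' => intro r h1 h2; omega

-- B's outer loop, entered at i = 0 or at an appended space index, produces exactly
-- the boundary indices beyond i
theorem seek_eq (cs : List Char) (m : Nat) : ∀ i acc, cs.length - i ≤ m →
    (i = 0 ∨ pvChr cs i = ' ') →
    seekLoop cs m i acc =
      acc ++ ((List.range cs.length).filter (condB cs i)).map (fun r => ((r : Nat) : Int)) := by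
  induction m with
  | zero =>
    intro i acc hm hi
    show acc = _
    have hnil : (List.range cs.length).filter (condB cs i) = [] := by
      rw [List.filter_eq_nil_iff]
      intro r hr
      have hrn := List.mem_range.mp hr
      simp only [condB, decide_eq_true_eq]
      rintro ⟨h1, _, _⟩
      omega
    rw [hnil]; simp
  | succ m ihm =>
    intro i acc hm hi
    rw [seekLoop]
    by_cases hskip : skipSpaces cs i < cs.length
    · rw [if_pos hskip]
      have hge := skipSpaces_ge cs i
      have hstop := skipSpaces_stop cs i hskip
      have hall := skipSpaces_all cs i
      by_cases hj : findSpace cs (skipSpaces cs i) = -1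
      · rw [if_pos hj]
        have hnone := findSpace_none cs (skipSpaces cs i) hj
        have hnil : (List.range cs.length).filter (condB cs i) = [] := by
          rw [List.filter_eq_nil_iff]
          intro r hr
          have hrn := List.mem_range.mp hr
          simp only [condB, decide_eq_true_eq]
          rintro ⟨h1, h2, h3⟩
          by_cases hcmp : r < skipSpaces cs i
          · exact h3 (hall (r - 1) (by omega) (by omega))
          · by_cases hcmp2 : r = skipSpaces cs i
            · exact hstop (hcmp2 ▸ h2)
            · exact hnone r (by omega) hrn h2
        rw [hnil]; simp
      · rw [if_neg hj]
        obtain ⟨jn, hje, hjge, hjlt, hjsp, hjmin⟩ := findSpace_spec cs (skipSpaces cs i) hj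
        have hine : skipSpaces cs i ≠ jn := fun he => hstop (he ▸ hjsp)
        have hij : i < jn := by omega
        rw [hje, Int.toNat_natCast]
        rw [ihm jn (acc ++ [(jn : Int)]) (by omega) (Or.inr hjsp)]
        have hsplitf : (List.range cs.length).filter (condB cs i) =
            jn :: (List.range cs.length).filter (condB cs jn) := by
          apply filter_range_eq_cons hjlt
          · simp only [condB, decide_eq_true_eq]
            refine ⟨hij, hjsp, ?_⟩
            rcases Nat.eq_or_lt_of_le (show skipSpaces cs i ≤ jn - 1 by omega) with he | hlt
            · exact he ▸ hstop
            · exact hjmin (jn - 1) (by omega) (by omega)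
          · intro r hr
            simp only [condB, decide_eq_false_iff_not]
            rintro ⟨h1, h2, h3⟩
            by_cases hcmp : r < skipSpaces cs i
            · exact h3 (hall (r - 1) (by omega) (by omega))
            · by_cases hcmp2 : r = skipSpaces cs i
              · exact hstop (hcmp2 ▸ h2)
              · exact hjmin r (by omega) (by omega) h2
          · intro r hr
            simp only [condB]
            congr 1
            simp only [eq_iff_iff]
            exact ⟨fun ⟨_, h2, h3⟩ => ⟨hr, h2, h3⟩, fun ⟨_, h2, h3⟩ => ⟨by omega, h2, h3⟩⟩
          · intro r hr
            simp only [condB, decide_eq_false_iff_not]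
            rintro ⟨h1, _, _⟩
            omega
        rw [hsplitf]
        simp
    · rw [if_neg hskip]
      have hall := skipSpaces_all cs i
      have hnil : (List.range cs.length).filter (condB cs i) = [] := by
        rw [List.filter_eq_nil_iff]
        intro r hr
        have hrn := List.mem_range.mp hr
        simp only [condB, decide_eq_true_eq]
        rintro ⟨h1, h2, h3⟩
        exact h3 (hall (r - 1) (by omega) (by omega))
      rw [hnil]; simp

-- ===== VERDICT (by name: the statement is the Claim_ definition above) =====
theorem get_heading_idx_for_sounding_txt_spec : Claim_equal_get_heading_idx_for_sounding_txt := by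
  intro header _ _
  show get_heading_idx_for_sounding_txt header = get_heading_idx_for_sounding_txt_alt header
  simp only [get_heading_idx_for_sounding_txt, get_heading_idx_for_sounding_txt_alt]
  rw [fold_lists_eq, foldB_filter,
    seek_eq header.toList (header.toList.length + 1) 0 [0] (by omega) (Or.inl rfl)]
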